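-- pv_equiv track=rewrite | github.com/CodeAlchemyproject/CodeAlchemy | utils/common.py | LaTex_double_dollars
-- ===== SOURCE A (Python) =====
-- def LaTex_double_dollars(input_string):
--     output_string = ''
--     for char in input_string:
--         if char == '$':
--             output_string += '$$'
--         else:
--             output_string += char
--     return output_string
-- ===== SOURCE B (Python) =====
-- def LaTex_double_dollars(input_string):
--     return '$$'.join(input_string.split('$'))
-- ===== Notes on version B (the rewrite author's own statement) =====
-- stated objective: faster
-- what changed: Replaces the char-by-char scan with growing string concatenation by one split on the dollar character followed by a join with the doubled separator, which reinserts a doubled dollar at each split point.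
import Mathlib
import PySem

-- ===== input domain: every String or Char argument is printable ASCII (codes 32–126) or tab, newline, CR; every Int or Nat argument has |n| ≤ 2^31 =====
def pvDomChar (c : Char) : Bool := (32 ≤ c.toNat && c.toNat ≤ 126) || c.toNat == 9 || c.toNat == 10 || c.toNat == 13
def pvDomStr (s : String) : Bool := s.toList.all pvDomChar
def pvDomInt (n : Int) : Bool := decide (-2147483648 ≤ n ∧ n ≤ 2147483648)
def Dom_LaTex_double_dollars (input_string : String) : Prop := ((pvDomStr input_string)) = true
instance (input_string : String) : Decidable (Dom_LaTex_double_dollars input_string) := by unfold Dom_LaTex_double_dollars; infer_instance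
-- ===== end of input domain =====

-- B replaces A's char-by-char scan-and-append with a split-on-'$' / join-with-'$$' decomposition (same result, different pass structure).


-- ===== PORT A =====
-- for char in input_string: output_string += '$$' if char == '$' else char
def LaTex_double_dollars (input_string : String) : String :=
  String.ofList (input_string.toList.foldl
    (fun acc c => acc ++ (if c = '$' then ['$', '$'] else [c])) [])

-- ===== PORT B =====
-- '$$'.join(input_string.split('$')); sep '$' is a nonempty literal, so split = PySem.Chars.splitOn
def LaTex_double_dollars_alt (input_string : String) : String :=
  String.ofList (PySem.Chars.join ['$', '$'] (PySem.Chars.splitOn input_string.toList ['$']))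

-- ===== PRECONDITION & SPEC =====
def Spec_LaTex_double_dollars (input_string : String) (out : String) : Prop := out = LaTex_double_dollars_alt input_string
instance (input_string : String) (out : String) : Decidable (Spec_LaTex_double_dollars input_string out) := by unfold Spec_LaTex_double_dollars; infer_instance

-- ===== CLAIM (what is proved, stated in full; the proofs are below) =====
def Claim_equal_LaTex_double_dollars : Prop := ∀ (input_string : String), Dom_LaTex_double_dollars input_string → Spec_LaTex_double_dollars input_string (LaTex_double_dollars input_string)

-- ===== LEMMAS AND PROOFS =====

/-- The doubled-dollar expansion as a flatMap (A's fold computes this). -/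
def pvDbl (l : List Char) : List Char :=
  l.flatMap (fun c => if c = '$' then ['$', '$'] else [c])

/-- Clean fuel-free recursion equivalent to `splitOn.go ['$']`. -/
def pvSplitAux : List Char → List Char → List (List Char)
  | [], cur => [cur.reverse]
  | c :: rest, cur =>
      if c = '$' then cur.reverse :: pvSplitAux rest []
      else pvSplitAux rest (c :: cur)

theorem pvSplitAux_ne_nil (l cur : List Char) : pvSplitAux l cur ≠ [] := by
  cases l with
  | nil => simp [pvSplitAux]
  | cons c rest =>
      simp only [pvSplitAux]
      split
      · simp
      · exact pvSplitAux_ne_nil rest (c :: cur)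

theorem pv_go_eq (fuel : Nat) (l cur : List Char) (acc : List (List Char))
    (h : l.length ≤ fuel) :
    PySem.Chars.splitOn.go ['$'] fuel l cur acc = acc.reverse ++ pvSplitAux l cur := by
  induction fuel generalizing l cur acc with
  | zero =>
      interval_cases hl : l.length
      rw [List.length_eq_zero_iff] at hl
      subst hl
      simp [PySem.Chars.splitOn.go, pvSplitAux]
  | succ fuel ih =>
      cases l with
      | nil => simp [PySem.Chars.splitOn.go, pvSplitAux]
      | cons c rest =>
          simp only [PySem.Chars.splitOn.go, pvSplitAux]
          by_cases hc : c = '$'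
          · subst hc
            rw [if_pos (by simp [List.isPrefixOf]), if_pos rfl]
            simp only [List.length_cons] at h
            rw [ih _ _ _ (by simp; omega)]
            simp
          · rw [if_neg (by simp [List.isPrefixOf]; exact fun h => hc h.symm), if_neg hc]
            simp only [List.length_cons] at h
            exact ih _ _ _ (by omega)

theorem pv_splitOn_eq (l : List Char) :
    PySem.Chars.splitOn l ['$'] = pvSplitAux l [] := by
  have := pv_go_eq (l.length + 1) l [] [] (by omega)
  simpa [PySem.Chars.splitOn] using this

theorem pv_join_cons (a : List Char) (L : List (List Char)) (hL : L ≠ []) :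
    PySem.Chars.join ['$', '$'] (a :: L) = a ++ ['$', '$'] ++ PySem.Chars.join ['$', '$'] L := by
  cases L with
  | nil => exact absurd rfl hL
  | cons b rest => simp [PySem.Chars.join, List.intercalate, List.intersperse]

theorem pv_join_splitAux (l cur : List Char) :
    PySem.Chars.join ['$', '$'] (pvSplitAux l cur) = cur.reverse ++ pvDbl l := by
  induction l generalizing cur with
  | nil => simp [pvSplitAux, pvDbl, PySem.Chars.join, List.intercalate]
  | cons c rest ih =>
      simp only [pvSplitAux]
      by_cases hc : c = '$'
      · subst hc
        rw [if_pos rfl, pv_join_cons _ _ (pvSplitAux_ne_nil _ _), ih]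
        simp [pvDbl]
      · rw [if_neg hc, ih]
        simp [pvDbl, hc]

theorem pv_foldl_dbl (l acc : List Char) :
    l.foldl (fun acc c => acc ++ (if c = '$' then ['$', '$'] else [c])) acc
      = acc ++ pvDbl l := by
  induction l generalizing acc with
  | nil => simp [pvDbl]
  | cons c rest ih => simp [pvDbl, ih]

-- ===== VERDICT (by name: the statement is the Claim_ definition above) =====
theorem LaTex_double_dollars_spec : Claim_equal_LaTex_double_dollars := by
  intro s _
  show String.ofList _ = String.ofList _
  rw [pv_splitOn_eq, pv_join_splitAux, pv_foldl_dbl]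
  simp
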